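-- pv_equiv track=rewrite | github.com/ITCJ/brainstorm-reproduce | python/brt/runtime/placement.py | sorted_k_even_partitions
-- ===== SOURCE A (Python) =====
-- import itertools
--
-- def sorted_k_even_partitions(seq, k, length):
--     """Returns a list of all unique k-partitions of `seq`.
--
--     Each partition is a list of parts, and each part is a tuple.
--
--     The parts in each individual partition will be sorted in shortlex
--     order (i.e., by length first, then lexicographically).
--
--     The overall list of partitions will then be sorted by the length
--     of their first part, the length of their second part, ...,
--     the length of their last part, and then lexicographically.
--     """
--     n = len(seq)
--     groups = []  # a list of lists, currently empty
--
--     def generate_partitions(i):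
--         if i >= n:
--             yield list(map(tuple, groups))
--         else:
--             if n - i > (k - len(groups)) * length:
--                 for group in groups:
--                     if len(group) < length:
--                         group.append(seq[i])
--                         yield from generate_partitions(i + 1)
--                         group.pop()
--                     # else:
--                     #     group.append(seq[i])
--                     #     yield from generate_partitions(i + 1)
--                     #     group.pop()
--
--             if len(groups) < k:
--                 groups.append([seq[i]])
--                 yield from generate_partitions(i + 1)
--                 groups.pop()
--
--     result = generate_partitions(0)
--
--     # Sort the parts in each partition in shortlex order
--     result = [sorted(ps, key=lambda p: (len(p), p)) for ps in result]
--     # Sort partitions by the length of each part, then lexicographically.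
--     result = sorted(result, key=lambda ps: (*map(len, ps), ps))
--     all_ordered_partitions = []
--
--     for partition in result:
--         ordered_partitions = list(itertools.permutations(partition))
--         ordered_partitions = [list(p) for p in ordered_partitions]
--         all_ordered_partitions.extend(ordered_partitions)
--
--     return all_ordered_partitions
-- ===== SOURCE B (Python) =====
-- import itertools
--
-- def sorted_k_even_partitions(seq, k, length):
--     """Same result as A, via an explicit worklist over restricted-growth label
--     strings (element i gets group label lab[i]); partitions are reconstructed
--     from the labels only at the end."""
--     n = len(seq)
--     labelings = []
--     stack = [[]]
--     while stack:
--         lab = stack.pop()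
--         i = len(lab)
--         if i == n:
--             labelings.append(lab)
--             continue
--         m = len(set(lab))  # groups so far; labels are canonical 0..m-1
--         if m < k:
--             stack.append(lab + [m])
--         if n - i > (k - m) * length:
--             for j in reversed(range(m)):
--                 if lab.count(j) < length:
--                     stack.append(lab + [j])
--     canon = []
--     for lab in labelings:
--         parts = [tuple(x for x, a in zip(seq, lab) if a == j)
--                  for j in range(len(set(lab)))]
--         parts.sort(key=lambda p: (len(p), p))
--         canon.append(parts)
--     canon.sort(key=lambda ps: ([len(p) for p in ps], ps))
--     return [list(q) for ps in canon for q in itertools.permutations(ps)]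
-- ===== Notes on version B (the rewrite author's own statement) =====
-- stated objective: alternative
-- what changed: The recursive generator that mutates a shared list of groups is replaced by an iterative worklist over restricted-growth label strings (each element gets a group label); the actual groups are reconstructed from the labels only after enumeration, and the permutation expansion is a flat comprehension instead of an extend loop.
import Mathlib
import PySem

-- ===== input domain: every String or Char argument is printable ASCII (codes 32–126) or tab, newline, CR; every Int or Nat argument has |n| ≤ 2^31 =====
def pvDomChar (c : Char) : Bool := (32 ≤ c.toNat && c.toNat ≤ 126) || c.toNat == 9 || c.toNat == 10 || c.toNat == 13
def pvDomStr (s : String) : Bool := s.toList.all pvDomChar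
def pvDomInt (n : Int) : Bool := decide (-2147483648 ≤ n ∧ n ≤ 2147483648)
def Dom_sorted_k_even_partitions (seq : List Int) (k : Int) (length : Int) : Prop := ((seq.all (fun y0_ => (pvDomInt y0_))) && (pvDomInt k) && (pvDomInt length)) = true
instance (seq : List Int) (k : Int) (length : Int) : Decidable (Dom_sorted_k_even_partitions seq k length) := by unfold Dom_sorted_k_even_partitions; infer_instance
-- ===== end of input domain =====

-- B replaces A's recursive generator over a shared mutable list of groups by an
-- iterative worklist over restricted-growth label strings, reconstructing the
-- groups from the labels only after enumeration (alternative decomposition).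


-- ===== PORT A =====
-- A's recursive generator `generate_partitions(i)`: fuel = number of items still
-- to place (call with fuel = seq.length, i = 0); `group.append/pop` becomes
-- recursing on `groups.set j (… ++ [x])`, `groups.append/pop` on `groups ++ [[x]]`.
def pvA_gen (seq : List Int) (k length : Int) : Nat → Int → List (List Int) → List (List (List Int))
  | fuel, i, groups =>
    if (seq.length : Int) ≤ i then [groups]
    else
      match fuel with
      | 0 => []  -- unreachable: fuel starts at seq.length and tracks seq.length - i
      | f + 1 =>
        (if (seq.length : Int) - i > (k - (groups.length : Int)) * length then
          (List.range groups.length).flatMap (fun j =>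
            if ((groups.getD j []).length : Int) < length then
              pvA_gen seq k length f (i + 1) (groups.set j ((groups.getD j []) ++ [PySem.List.pyGetD seq i 0]))
            else [])
         else [])
        ++
        (if (groups.length : Int) < k then
          pvA_gen seq k length f (i + 1) (groups ++ [[PySem.List.pyGetD seq i 0]])
         else [])

def sorted_k_even_partitions (seq : List Int) (k : Int) (length : Int) : List (List (List Int)) :=
  let raw := pvA_gen seq k length seq.length 0 []
  -- result = [sorted(ps, key=lambda p: (len(p), p)) for ps in result]
  let res1 := raw.map (fun ps => PySem.List.sorted2 ps (fun p => (p.length : Int)) (fun p => p))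
  -- result = sorted(result, key=lambda ps: (*map(len, ps), ps))
  let res2 := PySem.List.sorted2 res1 (fun ps => ps.map (fun p => (p.length : Int))) (fun ps => ps)
  -- extend with itertools.permutations of each partition
  res2.foldl (fun acc partition => acc ++ PySem.List.permutations partition partition.length) []

-- ===== PORT B =====
-- the successors of one worklist entry, listed in the order the LIFO worklist
-- pops them (Source B pushes them in the reverse of this order)
def pvB_children (seq : List Int) (k length : Int) (lab : List Int) : List (List Int) :=
  let m : Int := ((PySem.Set.ofList lab).length : Int)   -- m = len(set(lab))
  (if (seq.length : Int) - (lab.length : Int) > (k - m) * length then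
     (List.range m.toNat).flatMap (fun (j : Nat) =>
       if ((PySem.List.count lab (j : Int) : Int) < length) then [lab ++ [(j : Int)]] else [])
   else [])
  ++ (if m < k then [lab ++ [m]] else [])

-- every successor extends the label string by one element
theorem pvB_children_len (seq : List Int) (k length : Int) (lab c : List Int)
    (hc : c ∈ pvB_children seq k length lab) : c.length = lab.length + 1 := by
  unfold pvB_children at hc
  simp only [List.mem_append] at hc
  rcases hc with hc | hc
  · split_ifs at hc
    · simp only [List.mem_flatMap] at hc
      obtain ⟨j, _, hj⟩ := hc
      split_ifs at hj <;> simp_all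
    · simp at hc
  · split_ifs at hc <;> simp_all

theorem pvB_children_card (seq : List Int) (k length : Int) (lab : List Int) :
    (pvB_children seq k length lab).length ≤ (PySem.Set.ofList lab).length + 1 := by
  unfold pvB_children
  have h1 : ∀ (L : List Nat) (f : Nat → List (List Int)),
      (∀ j, (f j).length ≤ 1) → (L.flatMap f).length ≤ L.length := by
    intro L f hf
    induction L with
    | nil => simp
    | cons a t ih =>
      simp only [List.flatMap_cons, List.length_append, List.length_cons]
      have := hf a
      omega
  have h2 := h1 (List.range ((((PySem.Set.ofList lab).length : Int)).toNat))
      (fun (j : Nat) => if ((PySem.List.count lab (j : Int) : Int) < length) then [lab ++ [(j : Int)]] else [])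
      (by
        intro j
        dsimp only
        split_ifs <;> simp)
  simp only [List.length_append]
  refine Nat.add_le_add ?_ ?_
  · split_ifs
    · exact le_trans h2 (by simp)
    · simp
  · split_ifs <;> simp

-- set(lab) has at most len(lab) elements (termination helper)
theorem pvSet_len_le (lab : List Int) : (PySem.Set.ofList lab).length ≤ lab.length := by
  rw [PySem.Set.ofList_eq_foldl]
  suffices h : ∀ (xs acc : List Int), (xs.foldl PySem.Set.add acc).length ≤ acc.length + xs.length by
    simpa using h lab []
  intro xs
  induction xs with
  | nil => simp
  | cons a t ih =>
    intro acc
    refine le_trans (ih _) ?_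
    have h1 : (PySem.Set.add acc a).length ≤ acc.length + 1 := by
      unfold PySem.Set.add
      split_ifs <;> simp
    have h2 : (a :: t).length = t.length + 1 := rfl
    omega

def pvB_measure (n : Nat) (st : List (List Int)) : Nat :=
  (st.map (fun lab => (n + 1) ^ (n - lab.length + 1))).sum

theorem pvB_measure_step (seq : List Int) (k length : Int) (lab : List Int)
    (rest : List (List Int)) (h : ¬ seq.length ≤ lab.length) :
    pvB_measure seq.length (pvB_children seq k length lab ++ rest) <
      pvB_measure seq.length (lab :: rest) := by
  unfold pvB_measure
  rw [List.map_append, List.sum_append, List.map_cons, List.sum_cons]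
  have hlen : ∀ c ∈ pvB_children seq k length lab, c.length = lab.length + 1 :=
    fun c hc => pvB_children_len seq k length lab c hc
  set n := seq.length with hn
  have hterm : ((pvB_children seq k length lab).map
      (fun lab => (n + 1) ^ (n - lab.length + 1))).sum
      = (pvB_children seq k length lab).length * (n + 1) ^ (n - (lab.length + 1) + 1) := by
    have hmem : ∀ b ∈ (pvB_children seq k length lab).map (fun c => (n + 1) ^ (n - c.length + 1)),
        b = (n + 1) ^ (n - (lab.length + 1) + 1) := by
      intro b hb
      simp only [List.mem_map] at hb
      obtain ⟨c, hc, rfl⟩ := hb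
      rw [hlen c hc]
    have heq := List.eq_replicate_of_mem hmem
    rw [List.length_map] at heq
    rw [heq, List.sum_replicate, smul_eq_mul]
  rw [hterm]
  have hcard : (pvB_children seq k length lab).length ≤ n := by
    have := pvB_children_card seq k length lab
    have := pvSet_len_le lab
    omega
  have hexp : n - lab.length + 1 = (n - (lab.length + 1) + 1) + 1 := by omega
  have hfinal : (pvB_children seq k length lab).length * (n + 1) ^ (n - (lab.length + 1) + 1)
      < (n + 1) ^ (n - lab.length + 1) := by
    calc (pvB_children seq k length lab).length * (n + 1) ^ (n - (lab.length + 1) + 1)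
        ≤ n * (n + 1) ^ (n - (lab.length + 1) + 1) := by gcongr
      _ < (n + 1) * (n + 1) ^ (n - (lab.length + 1) + 1) := by
          have hp : 0 < (n + 1) ^ (n - (lab.length + 1) + 1) := pow_pos (by omega) _
          exact (Nat.mul_lt_mul_right hp).mpr (by omega)
      _ = (n + 1) ^ (n - lab.length + 1) := by rw [hexp, pow_succ]; ring
  omega

-- the worklist loop of Source B: pop the top entry, emit it if complete, otherwise
-- push its successors (head of the list = top of python's stack)
def pvB_run (seq : List Int) (k length : Int) : List (List Int) → List (List Int)
  | [] => []
  | lab :: rest =>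
    if seq.length ≤ lab.length then   -- Source B tests i == n; entries never exceed n
      lab :: pvB_run seq k length rest
    else
      pvB_run seq k length (pvB_children seq k length lab ++ rest)
  termination_by st => pvB_measure seq.length st
  decreasing_by
  · unfold pvB_measure
    simp only [List.map_cons, List.sum_cons]
    have : 0 < (seq.length + 1) ^ (seq.length - lab.length + 1) := pow_pos (by omega) _
    omega
  · exact pvB_measure_step seq k length lab rest (by assumption)

-- parts reconstructed from a label string:
-- [tuple(x for x, a in zip(seq, lab) if a == j) for j in range(len(set(lab)))]
def pvPartsOf (seq lab : List Int) : List (List Int) :=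
  (List.range (PySem.Set.ofList lab).length).map (fun (j : Nat) =>
    ((seq.zip lab).filter (fun p => p.2 == (j : Int))).map (fun p => p.1))

def sorted_k_even_partitions_alt (seq : List Int) (k : Int) (length : Int) : List (List (List Int)) :=
  let labelings := pvB_run seq k length [[]]
  let canon := labelings.map (fun lab =>
    PySem.List.sorted2 (pvPartsOf seq lab) (fun p => (p.length : Int)) (fun p => p))
  let canon2 := PySem.List.sorted2 canon (fun ps => ps.map (fun p => (p.length : Int))) (fun ps => ps)
  canon2.flatMap (fun ps => PySem.List.permutations ps ps.length)

-- ===== PRECONDITION & SPEC =====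
def Spec_sorted_k_even_partitions (seq : List Int) (k : Int) (length : Int) (out : List (List (List Int))) : Prop := out = sorted_k_even_partitions_alt seq k length
instance (seq : List Int) (k : Int) (length : Int) (out : List (List (List Int))) : Decidable (Spec_sorted_k_even_partitions seq k length out) := by unfold Spec_sorted_k_even_partitions; infer_instance

-- ===== CLAIM (what is proved, stated in full; the proofs are below) =====
def Claim_equal_sorted_k_even_partitions : Prop := ∀ (seq : List Int) (k : Int) (length : Int), Dom_sorted_k_even_partitions seq k length → Spec_sorted_k_even_partitions seq k length (sorted_k_even_partitions seq k length)

-- ===== LEMMAS AND PROOFS =====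

-- a label string is canonical ("restricted growth"): its distinct labels, in
-- first-occurrence order, are exactly 0, 1, …, m-1
def pvGood (lab : List Int) : Prop :=
  PySem.Set.ofList lab = (List.range (PySem.Set.ofList lab).length).map (fun (t : Nat) => (t : Int))

-- one unfolding of A's generator in the non-terminal case
theorem pvA_gen_succ (seq : List Int) (k length : Int) (f : Nat) (i : Int)
    (groups : List (List Int)) (h : ¬ (seq.length : Int) ≤ i) :
    pvA_gen seq k length (f + 1) i groups =
      (if (seq.length : Int) - i > (k - (groups.length : Int)) * length then
        (List.range groups.length).flatMap (fun j =>
          if ((groups.getD j []).length : Int) < length then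
            pvA_gen seq k length f (i + 1) (groups.set j ((groups.getD j []) ++ [PySem.List.pyGetD seq i 0]))
          else [])
       else [])
      ++ (if (groups.length : Int) < k then
            pvA_gen seq k length f (i + 1) (groups ++ [[PySem.List.pyGetD seq i 0]])
          else []) := by
  rw [pvA_gen, if_neg h]

-- zip with a one-longer label string appends one pair
theorem pvZipSnoc (seq : List Int) : ∀ (lab : List Int) (v : Int), lab.length < seq.length →
    seq.zip (lab ++ [v]) = seq.zip lab ++ [(seq.getD lab.length 0, v)] := by
  induction seq with
  | nil => intro lab v h; simp at h
  | cons a s ih =>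
    intro lab v h
    cases lab with
    | nil => simp [List.zip]
    | cons b t =>
      have h' : t.length < s.length := by simpa using h
      simp only [List.cons_append, List.zip_cons_cons, List.getD, List.length_cons]
      rw [ih t v h']
      simp [List.getD]

-- per-label filtered length = count of that label
theorem pvCountFilter (seq lab : List Int) (v : Int) (h : lab.length ≤ seq.length) :
    (((seq.zip lab).filter (fun p => p.2 == v)).map Prod.fst).length = lab.count v := by
  rw [List.length_map, ← List.countP_eq_length_filter]
  have hsnd : (seq.zip lab).map Prod.snd = lab := List.map_snd_zip h
  calc (seq.zip lab).countP (fun p => p.2 == v)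
      = ((seq.zip lab).map Prod.snd).countP (fun x => x == v) := by
        rw [List.countP_map]; rfl
    _ = lab.count v := by rw [hsnd, List.count]

-- a label absent from lab matches nothing in the zip
theorem pvFilterNil (seq lab : List Int) (v : Int) (hv : v ∉ lab) :
    (seq.zip lab).filter (fun p => p.2 == v) = [] := by
  rw [List.filter_eq_nil_iff]
  intro p hp
  have : p.2 ∈ lab := (List.of_mem_zip hp).2
  simp only [beq_iff_eq]
  intro hpe; exact hv (hpe ▸ this)

-- pvGood facts
theorem pvGood_mem (lab : List Int) (hg : pvGood lab) (j : Nat)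
    (hj : j < (PySem.Set.ofList lab).length) : (j : Int) ∈ lab := by
  have : (j : Int) ∈ PySem.Set.ofList lab := by
    rw [hg]; exact List.mem_map.mpr ⟨j, List.mem_range.mpr hj, rfl⟩
  exact (PySem.Set.mem_ofList _ _).mp this

theorem pvGood_not_mem (lab : List Int) (hg : pvGood lab) :
    ((PySem.Set.ofList lab).length : Int) ∉ lab := by
  intro hmem
  have h1 : ((PySem.Set.ofList lab).length : Int)
      ∈ (List.range (PySem.Set.ofList lab).length).map (fun (t : Nat) => (t : Int)) := by
    rw [← hg]
    exact (PySem.Set.mem_ofList _ _).mpr hmem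
  obtain ⟨t, ht, he⟩ := List.mem_map.mp h1
  have h2 := List.mem_range.mp ht
  have h3 : t = (PySem.Set.ofList lab).length := by exact_mod_cast he
  omega

theorem pvOfList_snoc_mem (lab : List Int) (v : Int) (hv : v ∈ lab) :
    PySem.Set.ofList (lab ++ [v]) = PySem.Set.ofList lab := by
  rw [PySem.Set.ofList_eq_foldl, List.foldl_append, ← PySem.Set.ofList_eq_foldl]
  simp only [List.foldl_cons, List.foldl_nil]
  unfold PySem.Set.add
  rw [if_pos]
  simpa [PySem.Set.contains] using (PySem.Set.mem_ofList _ _).mpr hv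

theorem pvOfList_snoc_not_mem (lab : List Int) (v : Int) (hv : v ∉ lab) :
    PySem.Set.ofList (lab ++ [v]) = PySem.Set.ofList lab ++ [v] := by
  rw [PySem.Set.ofList_eq_foldl, List.foldl_append, ← PySem.Set.ofList_eq_foldl]
  simp only [List.foldl_cons, List.foldl_nil]
  unfold PySem.Set.add
  rw [if_neg]
  simpa [PySem.Set.contains] using fun h => hv ((PySem.Set.mem_ofList _ _).mp h)

theorem pvGood_snoc_old (lab : List Int) (hg : pvGood lab) (j : Nat)
    (hj : j < (PySem.Set.ofList lab).length) : pvGood (lab ++ [(j : Int)]) := by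
  unfold pvGood
  rw [pvOfList_snoc_mem lab _ (pvGood_mem lab hg j hj)]
  exact hg

theorem pvGood_snoc_new (lab : List Int) (hg : pvGood lab) :
    pvGood (lab ++ [((PySem.Set.ofList lab).length : Int)]) := by
  unfold pvGood
  rw [pvOfList_snoc_not_mem lab _ (pvGood_not_mem lab hg)]
  simp only [List.length_append, List.length_singleton]
  rw [List.range_succ, List.map_append]
  rw [← hg]
  simp

-- pvPartsOf basic facts
theorem pvParts_len (seq lab : List Int) :
    (pvPartsOf seq lab).length = (PySem.Set.ofList lab).length := by
  simp [pvPartsOf]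

theorem pvParts_getD (seq lab : List Int) (j : Nat) (hj : j < (PySem.Set.ofList lab).length) :
    (pvPartsOf seq lab).getD j []
      = ((seq.zip lab).filter (fun p => p.2 == (j : Int))).map Prod.fst := by
  unfold pvPartsOf
  rw [List.getD_eq_getElem?_getD, List.getElem?_map, List.getElem?_range hj]
  rfl

-- appending an existing label j sends part j's one element further
theorem pvParts_snoc_old (seq lab : List Int) (hi : lab.length < seq.length)
    (hg : pvGood lab) (j : Nat) (hj : j < (PySem.Set.ofList lab).length) :
    pvPartsOf seq (lab ++ [(j : Int)])
      = (pvPartsOf seq lab).set j ((pvPartsOf seq lab).getD j [] ++ [seq.getD lab.length 0]) := by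
  have hof := pvOfList_snoc_mem lab _ (pvGood_mem lab hg j hj)
  have hzip := pvZipSnoc seq lab ((j : Int)) hi
  rw [pvParts_getD seq lab j hj]
  apply List.ext_getElem
  · simp [pvPartsOf, hof]
  intro t ht ht2
  rw [List.getElem_set]
  simp only [pvPartsOf, List.getElem_map, List.getElem_range]
  rw [hzip, List.filter_append, List.map_append]
  by_cases hte : j = t
  · subst hte
    simp
  · rw [if_neg hte]
    have hbeq : ((((j : Int)) == ((t : Int))) = false) := by
      simp only [beq_eq_false_iff_ne, ne_eq]
      intro hc
      exact hte (by exact_mod_cast hc)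
    simp [hbeq]

-- appending the fresh label opens a new singleton part at the end
theorem pvParts_snoc_new (seq lab : List Int) (hi : lab.length < seq.length)
    (hg : pvGood lab) :
    pvPartsOf seq (lab ++ [((PySem.Set.ofList lab).length : Int)])
      = pvPartsOf seq lab ++ [[seq.getD lab.length 0]] := by
  have hof := pvOfList_snoc_not_mem lab _ (pvGood_not_mem lab hg)
  have hzip := pvZipSnoc seq lab (((PySem.Set.ofList lab).length : Int)) hi
  unfold pvPartsOf
  rw [hof]
  simp only [List.length_append, List.length_singleton]
  rw [List.range_succ, List.map_append]
  congr 1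
  · apply List.map_congr_left
    intro t ht
    have htm := List.mem_range.mp ht
    rw [hzip, List.filter_append, List.map_append]
    have : (((((PySem.Set.ofList lab).length : Int)) == ((t : Int))) = false) := by
      simp only [beq_eq_false_iff_ne, ne_eq]
      intro hc
      have : (PySem.Set.ofList lab).length = t := by exact_mod_cast hc
      omega
    simp [this]
  · simp only [List.map_cons, List.map_nil]
    rw [hzip, List.filter_append]
    rw [pvFilterNil seq lab _ (pvGood_not_mem lab hg)]
    simp

-- part j's length is the count of label j
theorem pvParts_count (seq lab : List Int) (h : lab.length ≤ seq.length) (j : Nat)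
    (hj : j < (PySem.Set.ofList lab).length) :
    (((pvPartsOf seq lab).getD j []).length) = lab.count ((j : Int)) := by
  rw [pvParts_getD seq lab j hj]
  exact pvCountFilter seq lab _ h

-- children of a good entry are good
theorem pvB_children_good (seq : List Int) (k length : Int) (lab : List Int)
    (hg : pvGood lab) : ∀ c ∈ pvB_children seq k length lab, pvGood c := by
  intro c hc
  unfold pvB_children at hc
  simp only [List.mem_append] at hc
  rcases hc with hc | hc
  · split_ifs at hc
    · simp only [List.mem_flatMap, List.mem_range] at hc
      obtain ⟨j, hj, hj2⟩ := hc
      split_ifs at hj2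
      · simp only [List.mem_singleton] at hj2
        subst hj2
        exact pvGood_snoc_old lab hg j (by simpa using hj)
      · simp at hj2
    · simp at hc
  · split_ifs at hc
    · simp only [List.mem_singleton] at hc
      subst hc
      exact pvGood_snoc_new lab hg
    · simp at hc

-- THE STEP: folding A's one-step expansion through B's successor list
theorem pvStep (seq : List Int) (k length : Int) (lab : List Int)
    (hg : pvGood lab) (hi : lab.length < seq.length) :
    (pvB_children seq k length lab).flatMap
        (fun c => pvA_gen seq k length (seq.length - c.length) ((c.length : Int)) (pvPartsOf seq c))
      = pvA_gen seq k length (seq.length - lab.length) ((lab.length : Int)) (pvPartsOf seq lab) := by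
  have hfe : seq.length - lab.length = (seq.length - (lab.length + 1)) + 1 := by omega
  have hni : ¬ (seq.length : Int) ≤ (lab.length : Int) := by exact_mod_cast Nat.not_le.mpr hi
  rw [hfe, pvA_gen_succ seq k length _ _ _ hni]
  have hlen := pvParts_len seq lab
  have hx : PySem.List.pyGetD seq ((lab.length : Int)) 0 = seq.getD lab.length 0 := by
    simp [PySem.List.pyGetD_natCast]
  unfold pvB_children
  rw [List.flatMap_append]
  congr 1
  · rw [hlen, Int.toNat_natCast]
    split_ifs with h1
    · rw [List.flatMap_assoc]
      apply List.flatMap_congr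
      intro j hj
      have hjm := List.mem_range.mp hj
      have hcnt : ((PySem.List.count lab ((j : Int)) : Int) < length)
          = ((((pvPartsOf seq lab).getD j []).length : Int) < length) := by
        rw [PySem.List.count_eq, ← pvParts_count seq lab (le_of_lt hi) j hjm]
      simp only [hcnt]
      split_ifs with h3
      · simp only [List.flatMap_singleton]
        rw [pvParts_snoc_old seq lab hi hg j hjm]
        have hcl : ((lab ++ [((j : Int))]).length) = lab.length + 1 := by
          rw [List.length_append]
          rfl
        rw [hcl, hx, Nat.cast_add, Nat.cast_one]
      · simp
    · rfl
  · rw [hlen]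
    split_ifs with h1
    · simp only [List.flatMap_singleton]
      rw [pvParts_snoc_new seq lab hi hg]
      have hcl : ((lab ++ [(((PySem.Set.ofList lab).length : Int))]).length) = lab.length + 1 := by
        rw [List.length_append]
        rfl
      rw [hcl, hx, Nat.cast_add, Nat.cast_one]
    · rfl

theorem pvMain (seq : List Int) (k length : Int) :
    ∀ st : List (List Int), (∀ lab ∈ st, pvGood lab ∧ lab.length ≤ seq.length) →
      (pvB_run seq k length st).map (pvPartsOf seq)
        = st.flatMap (fun lab =>
            pvA_gen seq k length (seq.length - lab.length) (lab.length : Int) (pvPartsOf seq lab)) := by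
  suffices H : ∀ (N : Nat) (st : List (List Int)), pvB_measure seq.length st ≤ N →
      (∀ lab ∈ st, pvGood lab ∧ lab.length ≤ seq.length) →
      (pvB_run seq k length st).map (pvPartsOf seq)
        = st.flatMap (fun lab =>
            pvA_gen seq k length (seq.length - lab.length) ((lab.length : Int)) (pvPartsOf seq lab)) from
    fun st h => H (pvB_measure seq.length st) st le_rfl h
  intro N
  induction N with
  | zero =>
    intro st hm h
    cases st with
    | nil => simp [pvB_run]
    | cons lab rest =>
      exfalso
      unfold pvB_measure at hm
      have : 0 < (seq.length + 1) ^ (seq.length - lab.length + 1) := pow_pos (by omega) _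
      simp only [List.map_cons, List.sum_cons] at hm
      omega
  | succ N ih =>
    intro st hm h
    cases st with
    | nil => simp [pvB_run]
    | cons lab rest =>
      have hpos : 0 < (seq.length + 1) ^ (seq.length - lab.length + 1) := pow_pos (by omega) _
      have hmc : pvB_measure seq.length (lab :: rest)
          = (seq.length + 1) ^ (seq.length - lab.length + 1) + pvB_measure seq.length rest := by
        unfold pvB_measure; simp
      by_cases hterm : seq.length ≤ lab.length
      · rw [pvB_run, if_pos hterm]
        have hrest : pvB_measure seq.length rest ≤ N := by omega
        rw [List.map_cons, ih rest hrest (fun l hl => h l (List.mem_cons_of_mem _ hl))]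
        rw [List.flatMap_cons]
        have heq : lab.length = seq.length := le_antisymm (h lab (List.mem_cons_self)).2 hterm
        have : pvA_gen seq k length (seq.length - lab.length) ((lab.length : Int)) (pvPartsOf seq lab)
            = [pvPartsOf seq lab] := by
          rw [show seq.length - lab.length = 0 from by omega]
          rw [pvA_gen, if_pos (by exact_mod_cast le_of_eq heq.symm)]
        rw [this]
        rfl
      · rw [pvB_run, if_neg hterm]
        have hi : lab.length < seq.length := Nat.not_le.mp hterm
        have hgood : ∀ l ∈ pvB_children seq k length lab ++ rest,
            pvGood l ∧ l.length ≤ seq.length := by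
          intro l hl
          rcases List.mem_append.mp hl with hl | hl
          · constructor
            · exact pvB_children_good seq k length lab (h lab (List.mem_cons_self)).1 l hl
            · rw [pvB_children_len seq k length lab l hl]; omega
          · exact h l (List.mem_cons_of_mem _ hl)
        have hmlt := pvB_measure_step seq k length lab rest hterm
        have hm2 : pvB_measure seq.length (pvB_children seq k length lab ++ rest) ≤ N := by omega
        rw [ih _ hm2 hgood]
        rw [List.flatMap_append, List.flatMap_cons]
        congr 1
        exact pvStep seq k length lab (h lab (List.mem_cons_self)).1 hi

-- ===== VERDICT (by name: the statement is the Claim_ definition above) =====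
theorem sorted_k_even_partitions_spec : Claim_equal_sorted_k_even_partitions := by
  intro seq k length _
  unfold Spec_sorted_k_even_partitions sorted_k_even_partitions sorted_k_even_partitions_alt
  have h := pvMain seq k length [[]] (by
    intro lab hlab
    simp only [List.mem_singleton] at hlab
    subst hlab
    exact ⟨by simp [pvGood, PySem.Set.ofList], by simp⟩)
  have hparts : pvPartsOf seq [] = [] := by simp [pvPartsOf, PySem.Set.ofList]
  simp only [List.flatMap_cons, List.flatMap_nil, List.append_nil, hparts] at h
  simp only [List.length_nil, Nat.sub_zero, Int.ofNat_zero] at h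
  have h2 : (pvB_run seq k length [[]]).map (fun lab =>
        PySem.List.sorted2 (pvPartsOf seq lab) (fun p => (p.length : Int)) (fun p => p))
      = (pvA_gen seq k length seq.length 0 []).map (fun ps =>
        PySem.List.sorted2 ps (fun p => (p.length : Int)) (fun p => p)) := by
    rw [← h, List.map_map]
    rfl
  dsimp only
  rw [PySem.List.foldl_append_eq_flatMap, h2]
  simp
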